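-- pv_equiv track=rewrite | github.com/matheusfarnetani/cs50p_project | models/pedestrian_ramp.py | createMap
-- ===== SOURCE A (Python) =====
-- def createMap(mapLength):
--     map = []
--     for i in range(mapLength):
--         map.append("none")
--     lastIndex = mapLength - 1
--     for i in range(mapLength):
--         if i == 0:
--             map[0] = "start"
--         elif i == lastIndex:
--             map[lastIndex] = "end"
--         elif i % 2 == 0:
--             map[i] = "landing"
--         else:
--             map[i] = "ramp"
--     return map
-- ===== SOURCE B (Python) =====
-- def createMap(mapLength):
--     if mapLength <= 0:
--         return []
--     if mapLength == 1:
--         return ["start"]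
--     interior = mapLength - 2
--     tile = ["ramp", "landing"] * ((interior + 1) // 2)
--     return ["start"] + tile[:interior] + ["end"]
-- ===== Notes on version B (the rewrite author's own statement) =====
-- stated objective: alternative
-- what changed: Replaces the fill-then-assign indexed loops by concatenation: the interior is produced by repeating the two-element block ["ramp","landing"] with list multiplication and slicing it to length, then the result is ["start"] + interior + ["end"], with explicit cases for empty and length-1 maps; no per-index loop or parity test remains.
import Mathlib
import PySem

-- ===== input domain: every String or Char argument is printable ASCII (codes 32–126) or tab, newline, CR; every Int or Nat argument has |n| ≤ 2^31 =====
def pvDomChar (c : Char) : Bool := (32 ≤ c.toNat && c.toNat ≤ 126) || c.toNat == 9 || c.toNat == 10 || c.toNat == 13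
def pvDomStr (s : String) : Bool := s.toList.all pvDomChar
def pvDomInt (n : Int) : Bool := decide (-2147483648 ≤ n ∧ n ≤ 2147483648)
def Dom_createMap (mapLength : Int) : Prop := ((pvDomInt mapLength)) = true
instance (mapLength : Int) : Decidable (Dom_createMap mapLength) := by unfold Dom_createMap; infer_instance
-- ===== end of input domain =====

-- B builds the map by concatenation: a repeated ["ramp","landing"] block sliced to the interior
-- length, between explicit "start"/"end" cells; an alternative decomposition, same O(n) cost.

-- ===== PORT A =====
def createMap (mapLength : Int) : List String :=
  let map := (PySem.List.pyRange 0 mapLength 1).foldl (fun m _ => m ++ ["none"]) []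
  let lastIndex := mapLength - 1
  (PySem.List.pyRange 0 mapLength 1).foldl (fun m i =>
    if i == 0 then m.set 0 "start"
    else if i == lastIndex then m.set lastIndex.toNat "end"
    else if PySem.Int.mod i 2 == 0 then m.set i.toNat "landing"
    else m.set i.toNat "ramp") map

-- ===== PORT B =====
-- Python's list repetition l * k (k ≥ 0 on this branch) is List.flatten (List.replicate k l),
-- exact for nonnegative k; tile[:interior] is PySem.List.slice.
def createMap_alt (mapLength : Int) : List String :=
  if mapLength ≤ 0 then []
  else if mapLength == 1 then ["start"]
  else
    let interior := mapLength - 2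
    let tile := List.flatten (List.replicate
      (PySem.Int.floordiv (interior + 1) 2).toNat (["ramp", "landing"] : List String))
    ["start"] ++ PySem.List.slice tile none (some interior) ++ ["end"]

-- ===== PRECONDITION & SPEC =====
def Spec_createMap (mapLength : Int) (out : List String) : Prop := out = createMap_alt mapLength
instance (mapLength : Int) (out : List String) : Decidable (Spec_createMap mapLength out) := by unfold Spec_createMap; infer_instance

-- ===== CLAIM (what is proved, stated in full; the proofs are below) =====
def Claim_equal_createMap : Prop := ∀ (mapLength : Int), Dom_createMap mapLength → Spec_createMap mapLength (createMap mapLength)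

-- ===== LEMMAS AND PROOFS =====

-- the first loop of A appends n copies of "none"
theorem foldl_append_none : ∀ (l : List Int) (acc : List String),
    l.foldl (fun m _ => m ++ ["none"]) acc = acc ++ List.replicate l.length "none" := by
  intro l
  induction l with
  | nil => simp
  | cons x xs ih =>
      intro acc
      simp [List.foldl_cons, ih, List.replicate_succ]

-- folding index-wise sets over range(N) rewrites the first N cells
theorem foldl_set_range (g : Int → String) :
    ∀ (N : Nat) (m : List String), N ≤ m.length →
    (PySem.List.pyRange 0 (N : Int) 1).foldl (fun acc i => acc.set i.toNat (g i)) m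
      = (List.range N).map (fun k : Nat => g (k : Int)) ++ m.drop N := by
  intro N
  induction N with
  | zero => intro m _; simp [PySem.List.pyRange_one_eq_nil]
  | succ N ih =>
      intro m hm
      have hsplit : PySem.List.pyRange 0 ((N + 1 : Nat) : Int) 1
          = PySem.List.pyRange 0 (N : Int) 1 ++ [(N : Int)] := by
        have h : ((N + 1 : Nat) : Int) = (N : Int) + 1 := by push_cast; ring
        rw [h, PySem.List.pyRange_one_succ_right (by positivity)]
      rw [hsplit, List.foldl_append, ih m (by omega)]
      simp only [List.foldl_cons, List.foldl_nil, Int.toNat_natCast]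
      have hlen : ((List.range N).map (fun k : Nat => g (k : Int))).length = N := by simp
      rw [List.set_append_right _ _ (hlen.le), hlen, Nat.sub_self]
      have hd : m.drop N = m[N] :: m.drop (N + 1) :=
        List.drop_eq_getElem_cons (by omega)
      rw [hd, List.set_cons_zero, List.range_succ, List.map_append,
        List.append_assoc, List.map_singleton, List.singleton_append]

-- A, for nonnegative length N, as an explicit map over range N
theorem createMap_eq_map (N : Nat) : createMap (N : Int) = (List.range N).map (fun k : Nat =>
    if (k : Int) == 0 then "start"
    else if (k : Int) == (N : Int) - 1 then "end"
    else if PySem.Int.mod (k : Int) 2 == 0 then "landing" else "ramp") := by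
  have hstep : (fun (m : List String) (i : Int) =>
      if i == 0 then m.set 0 "start"
      else if i == (N : Int) - 1 then m.set ((N : Int) - 1).toNat "end"
      else if PySem.Int.mod i 2 == 0 then m.set i.toNat "landing"
      else m.set i.toNat "ramp")
    = (fun (m : List String) (i : Int) => m.set i.toNat
        (if i == 0 then "start"
         else if i == (N : Int) - 1 then "end"
         else if PySem.Int.mod i 2 == 0 then "landing" else "ramp")) := by
    funext m i
    by_cases h0 : i = 0
    · simp [h0]
    · by_cases hl : i = (N : Int) - 1
      · subst hl
        simp [h0, beq_iff_eq]
      · simp [h0, hl, beq_iff_eq]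
        split_ifs <;> rfl
  have hlenfold : ((PySem.List.pyRange 0 (N : Int) 1).foldl
      (fun m _ => m ++ ["none"]) []).length = N := by
    rw [foldl_append_none]
    simp [PySem.List.length_pyRange_one]
  show (PySem.List.pyRange 0 (N : Int) 1).foldl _ _ = _
  rw [hstep, foldl_set_range _ N _ (le_of_eq hlenfold.symm)]
  rw [List.drop_eq_nil_of_le (le_of_eq hlenfold), List.append_nil]

-- the repeated two-element block, unrolled into a map over range
theorem tile_eq_map (k : Nat) :
    List.flatten (List.replicate k (["ramp", "landing"] : List String))
      = (List.range (2 * k)).map (fun j => if j % 2 = 0 then "ramp" else "landing") := by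
  induction k with
  | zero => simp
  | succ k ih =>
      rw [List.replicate_succ', List.flatten_append, ih]
      have h2 : 2 * (k + 1) = (2 * k + 1) + 1 := by ring
      rw [h2, List.range_succ, List.range_succ, List.map_append, List.map_append]
      have he : (2 * k) % 2 = 0 := by omega
      have ho : (2 * k + 1) % 2 = 1 := by omega
      simp [he, ho]

theorem createMap_eq_alt (n : Int) : createMap n = createMap_alt n := by
  rcases le_or_gt n 0 with hle | hpos
  · simp [createMap, createMap_alt, hle, PySem.List.pyRange_one_eq_nil hle]
  · obtain ⟨N, rfl⟩ : ∃ N : Nat, n = (N : Int) := ⟨n.toNat, by omega⟩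
    have hN1 : 1 ≤ N := by exact_mod_cast hpos
    rw [createMap_eq_map]
    by_cases hN : N = 1
    · subst hN
      simp [createMap_alt, List.range_one]
    · -- N ≥ 2
      have hN2 : 2 ≤ N := by omega
      set I : Nat := N - 2 with hI
      have hcast : (N : Int) - 2 = (I : Int) := by omega
      set k : Nat := (I + 1) / 2 with hk
      have hkfd : (PySem.Int.floordiv ((I : Int) + 1) 2).toNat = k := by
        rw [PySem.Int.floordiv_eq_ediv_of_pos (by omega)]
        omega
      have hIk : I ≤ 2 * k := by omega
      have hB : createMap_alt (N : Int)
          = "start" :: ((List.range I).map (fun j => if j % 2 = 0 then "ramp" else "landing")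
              ++ ["end"]) := by
        unfold createMap_alt
        rw [if_neg (by omega), if_neg (by simp [beq_iff_eq]; omega)]
        simp only [tile_eq_map, hcast, PySem.List.slice_to_natCast, ← List.map_take,
          List.take_range, hkfd]
        rw [Nat.min_eq_left hIk]
        simp
      rw [hB]
      apply List.ext_getElem
      · simp; omega
      · intro j hj hj'
        simp only [List.length_map, List.length_range] at hj
        rw [List.getElem_map, List.getElem_range]
        cases j with
        | zero => simp
        | succ j' =>
          rw [List.getElem_cons_succ]
          have h1 : ¬ ((j' + 1 : Nat) : Int) == 0 := by simp [beq_iff_eq]; omega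
          by_cases hjl : j' + 1 = N - 1
          · have hj'I : j' = I := by omega
            subst hj'I
            have h2 : ((I + 1 : Nat) : Int) == (N : Int) - 1 := by simp [beq_iff_eq]; omega
            rw [List.getElem_append_right (by simp)]
            simp only [List.length_map, List.length_range, Nat.sub_self, List.getElem_cons_zero]
            rw [if_neg (by exact_mod_cast h1), if_pos (by exact_mod_cast h2)]
          · have hj'I : j' < I := by omega
            rw [List.getElem_append_left (by simpa using hj'I)]
            rw [List.getElem_map, List.getElem_range]
            have h2 : ¬ ((j' + 1 : Nat) : Int) == (N : Int) - 1 := by simp [beq_iff_eq]; omega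
            have hmod : PySem.Int.mod ((j' + 1 : Nat) : Int) 2 = (((j' + 1) % 2 : Nat) : Int) := by
              rw [PySem.Int.mod_eq_emod_of_pos (by omega)]
              omega
            rw [if_neg (by exact_mod_cast h1), if_neg (by exact_mod_cast h2), hmod]
            by_cases hpar : (j' + 1) % 2 = 0
            · have hq : j' % 2 = 1 := by omega
              rw [hpar]
              simp [hq]
            · have hp1 : (j' + 1) % 2 = 1 := by omega
              have hq : j' % 2 = 0 := by omega
              rw [hp1]
              simp [hq]

-- ===== VERDICT (by name: the statement is the Claim_ definition above) =====
theorem createMap_spec : Claim_equal_createMap := by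
  intro n _
  unfold Spec_createMap
  exact createMap_eq_alt n
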